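-- pv_equiv track=rewrite | github.com/Evoltonnac/glancier | core/bootstrap.py | _workspace_contains_nonstarter_artifacts
-- ===== SOURCE A (Python) =====
-- def _workspace_contains_nonstarter_artifacts(
--     integration_files: list[str],
--     source_ids: set[str],
--     view_ids: set[str],
--     starter_files: set[str],
--     starter_sources: set[str],
--     starter_views: set[str],
-- ) -> bool:
--     return (
--         any(filename not in starter_files for filename in integration_files)
--         or any(source_id not in starter_sources for source_id in source_ids)
--         or any(view_id not in starter_views for view_id in view_ids)
--     )
-- ===== SOURCE B (Python) =====
-- def _workspace_contains_nonstarter_artifacts(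
--     integration_files,
--     source_ids,
--     view_ids,
--     starter_files,
--     starter_sources,
--     starter_views,
-- ):
--     # Union-cardinality test: ids contain a nonstarter artifact iff adding them
--     # to the starter set grows it.  One uniform loop over the three (ids, starter)
--     # pairs with early return.
--     for ids, starter in (
--         (integration_files, starter_files),
--         (source_ids, starter_sources),
--         (view_ids, starter_views),
--     ):
--         base = set(starter)
--         if len(base | set(ids)) != len(base):
--             return True
--     return False
-- ===== Notes on version B (the rewrite author's own statement) =====
-- stated objective: alternative
-- what changed: Replaces the three short-circuiting per-element 'not in' scans with a single loop over (ids, starter) pairs that applies a union-cardinality test: nonstarter artifacts exist iff len(starter | ids) > len(starter), so no element-wise membership test appears at all.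
import Mathlib
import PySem

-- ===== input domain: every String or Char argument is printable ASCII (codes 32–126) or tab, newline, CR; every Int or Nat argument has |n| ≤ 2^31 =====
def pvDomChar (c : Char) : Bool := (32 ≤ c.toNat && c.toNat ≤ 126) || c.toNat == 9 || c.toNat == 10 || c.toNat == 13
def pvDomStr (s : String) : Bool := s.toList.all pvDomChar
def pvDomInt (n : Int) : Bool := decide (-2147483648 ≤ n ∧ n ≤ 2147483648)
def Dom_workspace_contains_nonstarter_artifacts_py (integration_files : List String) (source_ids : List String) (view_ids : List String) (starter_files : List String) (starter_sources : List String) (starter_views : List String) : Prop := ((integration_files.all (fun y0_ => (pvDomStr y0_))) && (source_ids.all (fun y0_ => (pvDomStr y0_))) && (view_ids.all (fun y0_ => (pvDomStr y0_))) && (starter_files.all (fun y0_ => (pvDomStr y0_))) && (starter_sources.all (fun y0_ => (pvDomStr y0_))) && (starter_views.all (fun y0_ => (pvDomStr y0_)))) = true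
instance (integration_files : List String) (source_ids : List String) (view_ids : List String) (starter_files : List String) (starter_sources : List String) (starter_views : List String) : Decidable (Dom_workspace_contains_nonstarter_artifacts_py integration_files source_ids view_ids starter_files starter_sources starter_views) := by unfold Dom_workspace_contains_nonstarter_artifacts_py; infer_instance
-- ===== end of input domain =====

-- ===== PORT A =====
-- B replaces the three per-element membership scans with one loop over (ids, starter)
-- pairs applying a union-cardinality test (alternative decomposition; same cost).
def workspace_contains_nonstarter_artifacts_py (integration_files : List String) (source_ids : List String) (view_ids : List String) (starter_files : List String) (starter_sources : List String) (starter_views : List String) : Bool :=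
  (integration_files.any (fun filename => !(starter_files.contains filename)))
    || (source_ids.any (fun source_id => !(starter_sources.contains source_id)))
    || (view_ids.any (fun view_id => !(starter_views.contains view_id)))

-- ===== PORT B =====
-- the for-loop of Source B over the three (ids, starter) pairs, with early return True
def wcna_loop : List (List String × List String) → Bool
  | [] => false
  | (ids, starter) :: rest =>
    let base := PySem.Set.ofList starter
    if PySem.Set.len (PySem.Set.union base (PySem.Set.ofList ids)) ≠ PySem.Set.len base then
      true
    else
      wcna_loop rest

def workspace_contains_nonstarter_artifacts_py_alt (integration_files : List String) (source_ids : List String) (view_ids : List String) (starter_files : List String) (starter_sources : List String) (starter_views : List String) : Bool :=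
  wcna_loop [(integration_files, starter_files), (source_ids, starter_sources), (view_ids, starter_views)]

-- ===== PRECONDITION & SPEC =====
def Spec_workspace_contains_nonstarter_artifacts_py (integration_files : List String) (source_ids : List String) (view_ids : List String) (starter_files : List String) (starter_sources : List String) (starter_views : List String) (out : Bool) : Prop := out = workspace_contains_nonstarter_artifacts_py_alt integration_files source_ids view_ids starter_files starter_sources starter_views
instance (integration_files : List String) (source_ids : List String) (view_ids : List String) (starter_files : List String) (starter_sources : List String) (starter_views : List String) (out : Bool) : Decidable (Spec_workspace_contains_nonstarter_artifacts_py integration_files source_ids view_ids starter_files starter_sources starter_views out) := by unfold Spec_workspace_contains_nonstarter_artifacts_py; infer_instance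

-- ===== CLAIM =====
def Claim_equal_workspace_contains_nonstarter_artifacts_py : Prop := ∀ (integration_files : List String) (source_ids : List String) (view_ids : List String) (starter_files : List String) (starter_sources : List String) (starter_views : List String), Dom_workspace_contains_nonstarter_artifacts_py integration_files source_ids view_ids starter_files starter_sources starter_views → Spec_workspace_contains_nonstarter_artifacts_py integration_files source_ids view_ids starter_files starter_sources starter_views (workspace_contains_nonstarter_artifacts_py integration_files source_ids view_ids starter_files starter_sources starter_views)

-- ===== LEMMAS AND PROOFS =====

-- folding Set.add never shrinks the carrier list
theorem length_le_foldl_add (xs : List String) (s : PySem.Set String) :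
    s.length ≤ (xs.foldl PySem.Set.add s).length := by
  induction xs generalizing s with
  | nil => simp
  | cons x xs ih =>
    simp only [List.foldl_cons]
    calc s.length ≤ (PySem.Set.add s x).length := by
          rw [PySem.Set.add_eq_ite]; split <;> simp
      _ ≤ _ := ih _

-- the union-cardinality test: folding add leaves the length unchanged iff every added element was already present
theorem foldl_add_length_eq_iff (xs : List String) (s : PySem.Set String) :
    (xs.foldl PySem.Set.add s).length = s.length ↔ ∀ x ∈ xs, x ∈ s := by
  induction xs generalizing s with
  | nil => simp
  | cons x xs ih =>
    simp only [List.foldl_cons, List.mem_cons]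
    by_cases hx : x ∈ s
    · rw [PySem.Set.add_of_mem hx, ih]
      constructor
      · intro h y hy; rcases hy with rfl | hy
        · exact hx
        · exact h y hy
      · intro h y hy; exact h y (Or.inr hy)
    · rw [PySem.Set.add_of_not_mem hx]
      constructor
      · intro h
        exfalso
        have := length_le_foldl_add xs (s ++ [x])
        simp at this
        omega
      · intro h; exact absurd (h x (Or.inl rfl)) hx

-- one per-pair step of B equals one any-scan of A
theorem step_eq (ids starter : List String) :
    (decide (PySem.Set.len (PySem.Set.union (PySem.Set.ofList starter) (PySem.Set.ofList ids)) ≠ PySem.Set.len (PySem.Set.ofList starter)))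
      = ids.any (fun x => !(starter.contains x)) := by
  rw [Bool.eq_iff_iff]
  simp only [PySem.Set.union, PySem.Set.update, PySem.Set.len, decide_eq_true_eq]
  rw [List.any_eq_true]
  constructor
  · intro h
    by_contra hc
    push Not at hc
    apply h
    rw [Int.natCast_inj, foldl_add_length_eq_iff]
    intro x hx
    have := hc x ((PySem.Set.mem_ofList _ _).1 hx)
    rw [PySem.Set.mem_ofList]
    simpa using this
  · rintro ⟨x, hx, hxs⟩ hlen
    rw [Int.natCast_inj, foldl_add_length_eq_iff] at hlen
    have := hlen x ((PySem.Set.mem_ofList _ _).2 hx)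
    rw [PySem.Set.mem_ofList] at this
    simp at hxs
    exact hxs this

-- ===== VERDICT =====
theorem workspace_contains_nonstarter_artifacts_py_spec : Claim_equal_workspace_contains_nonstarter_artifacts_py := by
  intro f s v sf ss sv _
  unfold Spec_workspace_contains_nonstarter_artifacts_py
  unfold workspace_contains_nonstarter_artifacts_py workspace_contains_nonstarter_artifacts_py_alt
  simp only [wcna_loop]
  rw [← step_eq f sf, ← step_eq s ss, ← step_eq v sv]
  cases h1 : decide (PySem.Set.len (PySem.Set.union (PySem.Set.ofList sf) (PySem.Set.ofList f)) ≠ PySem.Set.len (PySem.Set.ofList sf)) <;>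
  cases h2 : decide (PySem.Set.len (PySem.Set.union (PySem.Set.ofList ss) (PySem.Set.ofList s)) ≠ PySem.Set.len (PySem.Set.ofList ss)) <;>
  cases h3 : decide (PySem.Set.len (PySem.Set.union (PySem.Set.ofList sv) (PySem.Set.ofList v)) ≠ PySem.Set.len (PySem.Set.ofList sv)) <;>
  simp_all
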